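/- GENERATED by tools/from_farm_form.py from prooffarm-gif/accepted/digest_file.3/Lemmas.lean (a worked proof of the farm's unit `digest_file.3`,
   accepted by the verdict) — do not edit. -/
import Gif.Spec.Units.digest_file_3
import Gif.Spec.AllSegs

/-!
  Lemmas for the unit `digest_file.3` (10585AH … 1058A9H, gif_driver.c:156-158): two contract calls (`digest_map`, `digest_int`), two
  checks. The return address of `digest_map`, 105871H (`ret12`), becomes a private cut with the function's shared assertion `At`.

      df3_seg_map      10585AH … `call digest_map` … 105871H (`At ret12`)
      df3_seg_count    105871H … `call digest_int` … 1059AFH (`Head F.imgs.length`)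
-/

open X86 X86.User Asan ProgX.Base ProgX.Base.Spec Gif.Spec

set_option maxRecDepth 4000
set_option maxHeartbeats 4000000

namespace Gif.Spec.digest_file_3

/-- **10585AH … 105871H** (gif_driver.c:156): the checked 8-byte load of `gif->SColorMap` (inside the live object `(F.gif, 120)`),
`digest_map(h, gif->SColorMap)`: its precondition from `At.inv` (`HeapPre.at_call` over the pushed return address), `ok.shape.scm`
(the map's fields lie off the stack) and `digest_file.owns_scm`. Behind the call `At` by `digest_file.At.carry`. -/
theorem df3_seg_map (Lay : Layout) (hLay : Lay.hi = 0x1000000) (μ : Microarch) (hμ : UserX.MicroOK μ) (u₀ : State)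
    (hcode : HasCodeNat Lay u₀ Gif.L.digest_file.entry Gif.Code.code_digest_file.nat Gif.L.digest_file.size)
    (h_digest_map : ∀ (H : Heap) (rest : List Obj) (frames : List (Nat × FrameLayout)) (m : Option Map),
      Calls Lay μ ProgX.Base.WayInv (ProgX.Base.conv u₀) Gif.L.digest_map.entry (Gif.Spec.digest_map.spec H rest frames m))
    (h_asan_load8_noabort : Asan.SmallCheck Lay μ ProgX.Base.WayInv (ProgX.Base.CodeOK u₀) [.rax, .rcx, .rdx] 8
      ProgX.Base.L.__asan_load8_noabort.entry)
    (H : Heap) (rest : List Obj) (frames : List (Nat × FrameLayout)) (F : Forest) (R : Rd) (e : State) (ret : Word) (v : State)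
    (hat : digest_file.At Gif.L.digest_file.at_10585a H rest frames F R u₀ e ret v) :
    ReachVia Lay μ ProgX.Base.WayInv v (digest_file.At Gif.L.digest_file.ret12 H rest frames F R u₀ e ret) := by
  -- 1. THE PRELUDE OF A SEGMENT
  have he := hat.entry
  v_entry he
  obtain ⟨henv, hcomp, hrdi, hpix, hpix1, hpix2⟩ := hat.pre
  have hbase := henv.heap.base
  have hok := hat.ok
  have hheap := hat.inv.heap
  -- where gif is, as numbers; it is live
  obtain ⟨wg1, wg2, -⟩ := hok.gif_where hheap hbase
  have hlg : LiveIn (H.liveObjs ++ rest) frames F.gif 120 := hok.gif_live.liveIn rest frames (Nat.le_refl _) (Nat.le_refl _)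
  -- digest_map's contract for the screen's map
  have hdm := h_digest_map H rest frames F.scm
  -- the present state, in the walker's names
  have w_rip := hat.rip
  have c_rsp : v.reg .rsp = e.reg .rsp - 88 := hat.rsp
  have c_r12 : v.reg .r12 = UInt64.ofNat F.gif := by
    rw [hat.r12]
    exact Word.eq_ofNat_of_toNat hrdi
  have w_eq : Mem.EqOn ProgX.Base.L.textLo ProgX.Base.L.textHi u₀.mem v.mem := ProgX.Base.conv_code_eqOn hat.code
  have hdf : v.flags .df = false := (show abiInv _ from hat.abi).1
  have hmx : v.mxcsr &&& 0x1F80 = 0x1F80 := (show abiInv _ from hat.abi).2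
  have hsse := ProgX.Base.sseOK_of_abiInv hat.abi
  have w_kept : RegsKept [.rsp] v v := RegsKept.refl _ _
  -- 2. THE FIELD THE SEGMENT LOADS, AS A FACT: `gif->SColorMap = p`
  have hscm := hok.shape.scm
  obtain ⟨p, hp⟩ : ∃ p, GifFileType.SColorMap v.mem F.gif = p := ⟨_, rfl⟩
  rw [hp] at hscm
  simp only [gfield] at hp
  have l_scm : v.mem.readLE (UInt64.ofNat F.gif + 0x18) 8 = p := by
    rw [rd_eq_readLE v.mem _ (F.gif + 24) 8 (by u_omega)]
    exact hp
  -- 3. THE WALK, to the return address of digest_map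
  u_walk hcode [hμ.vendor] until [Gif.L.digest_file.ret12]
    span [ProgX.Base.L.textLo, ProgX.Base.L.textHi] side (v_side)
  case check_10585f =>
    -- 0x10585f, gif_driver.c:156: the check of the load `gif->SColorMap`: inside the object `(F.gif, 120)`
    have hun : ShadowUntouched v.mem s_10585f.mem := by v_untouched
    exact hlg.accSmall hat.inv.shadow hun _ 8 (by decide) (by u_omega) (by u_omega)
  case call_inv =>
    v_inv
  case pre_10586c =>
    -- 0x10586c, gif_driver.c:156: DIGEST_MAP'S PRECONDITION; one stack store since `v`: the pushed return address
    have hs : Mem.SameExcept [⟨(e.reg .rsp).toNat - 224, (e.reg .rsp).toNat - 64⟩] v.mem s_10586c.mem := by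
      rw [w_mem]
      u_same
    have hpre' : HeapPre H rest frames s_10586c := by
      refine HeapPre.at_call henv.heap (SameRegion.refl H) hat.inv hs (by omega) ?_ ?_ ?_
      · rw [w_rsp]
        u_omega
      · rw [w_rsp]
        u_omega
      · rw [w_rsp]
        u_omega
    have howns := digest_file.owns_scm hok
    have hp64 : p < 2 ^ 64 := by
      rw [← hp]
      exact rd_lt v.mem (F.gif + 24) 8
    refine ⟨hpre', ?_, howns⟩
    rw [w_rsi, toNat_ofNat_addr p hp64]
    -- the map's fields: the map object is off the stack
    cases hm : F.scm with
    | none =>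
      rw [hm] at hscm
      exact hscm
    | some mp =>
      rw [hm] at hscm howns
      obtain ⟨hobj1, hobj2, -, -⟩ := howns.map_inside hheap hbase
      refine hscm.sameExcept hs (by omega) ?_
      intro w hw
      have hw_eq := List.mem_singleton.mp hw
      rw [hw_eq]
      right
      show (e.reg .rsp).toNat - 64 ≤ mp.obj
      omega
  -- 4. 0x105871 (ret12): DIGEST_MAP HAS RETURNED; it wrote stack only, below the own `rsp`: `At` by `digest_file.At.carry`
  v_after_call w_rsp_10586c w_mem_10586c
  have hsame : Mem.SameExcept [⟨(e.reg .rsp).toNat - 224, (e.reg .rsp).toNat - 64⟩] v.mem s_10586cr.mem := by u_same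
  have hun : ShadowUntouched v.mem s_10586cr.mem := by v_untouched
  have hat' := hat.carry (cut' := Gif.L.digest_file.ret12) w_rip w_rsp (w_kept.get .r12 rfl) w_code w_inv hun hsame
  exact ReachVia.done hat'

/-- **105871H … 1059AFH** (gif_driver.c:157-158): `rbx = h`; the checked 4-byte load of `gif->ImageCount` (inside `(F.gif, 120)`;
`= F.imgs.length` by `digest_file.imageCount`), stored to `[rsp+0xc]`; `digest_int(h, ImageCount)`; `[rsp] = h`, `r13d = 0`,
`[rsp+0x10] = 0`, `jmp` to the head: `Head F.imgs.length`. -/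
theorem df3_seg_count (Lay : Layout) (hLay : Lay.hi = 0x1000000) (μ : Microarch) (hμ : UserX.MicroOK μ) (u₀ : State)
    (hcode : HasCodeNat Lay u₀ Gif.L.digest_file.entry Gif.Code.code_digest_file.nat Gif.L.digest_file.size)
    (h_digest_int : Calls Lay μ ProgX.Base.WayInv (ProgX.Base.conv u₀) Gif.L.digest_int.entry Gif.Spec.digest_int.spec)
    (h_asan_load4_noabort : Asan.SmallCheck Lay μ ProgX.Base.WayInv (ProgX.Base.CodeOK u₀) [.rax, .rcx, .rdx] 4
      ProgX.Base.L.__asan_load4_noabort.entry)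
    (H : Heap) (rest : List Obj) (frames : List (Nat × FrameLayout)) (F : Forest) (R : Rd) (e : State) (ret : Word) (v : State)
    (hat : digest_file.At Gif.L.digest_file.ret12 H rest frames F R u₀ e ret v) :
    ReachVia Lay μ ProgX.Base.WayInv v (fun w => ∃ m : Nat, digest_file.Head m H rest frames F R u₀ e ret w) := by
  -- 1. THE PRELUDE OF A SEGMENT
  have he := hat.entry
  v_entry he
  obtain ⟨henv, hcomp, hrdi, hpix, hpix1, hpix2⟩ := hat.pre
  have hbase := henv.heap.base
  have hok := hat.ok
  have hheap := hat.inv.heap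
  -- where gif is, as numbers; it is live
  obtain ⟨wg1, wg2, -⟩ := hok.gif_where hheap hbase
  have hlg : LiveIn (H.liveObjs ++ rest) frames F.gif 120 := hok.gif_live.liveIn rest frames (Nat.le_refl _) (Nat.le_refl _)
  -- the present state, in the walker's names
  have w_rip := hat.rip
  have c_rsp : v.reg .rsp = e.reg .rsp - 88 := hat.rsp
  have c_r12 : v.reg .r12 = UInt64.ofNat F.gif := by
    rw [hat.r12]
    exact Word.eq_ofNat_of_toNat hrdi
  have w_eq : Mem.EqOn ProgX.Base.L.textLo ProgX.Base.L.textHi u₀.mem v.mem := ProgX.Base.conv_code_eqOn hat.code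
  have hdf : v.flags .df = false := (show abiInv _ from hat.abi).1
  have hmx : v.mxcsr &&& 0x1F80 = 0x1F80 := (show abiInv _ from hat.abi).2
  have hsse := ProgX.Base.sseOK_of_abiInv hat.abi
  have w_kept : RegsKept [.rsp] v v := RegsKept.refl _ _
  -- 2. THE FIELD THE SEGMENT LOADS, AS A FACT: `gif->ImageCount = F.imgs.length`
  have hcnt := digest_file.imageCount hok.shape
  simp only [gfield] at hcnt
  have l_cnt : v.mem.readLE (UInt64.ofNat F.gif + 0x20) 4 = F.imgs.length := by
    rw [rd_eq_readLE v.mem _ (F.gif + 32) 4 (by u_omega)]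
    exact hcnt
  -- 3. THE WALK, to the return address of digest_int
  u_walk hcode [hμ.vendor] until [Gif.L.digest_file.ret14, Gif.L.digest_file.at_1059af]
    span [ProgX.Base.L.textLo, ProgX.Base.L.textHi] side (v_side)
  case check_105879 =>
    -- 0x105879, gif_driver.c:157: the check of the load `gif->ImageCount`: inside the object `(F.gif, 120)`
    have hun : ShadowUntouched v.mem s_105879.mem := by v_untouched
    exact hlg.accSmall hat.inv.shadow hun _ 4 (by decide) (by u_omega) (by u_omega)
  case call_inv =>
    v_inv
  case pre_10588c =>
    trivial
  -- 4. 0x105891 (ret14): DIGEST_INT HAS RETURNED; it wrote stack only, below the own `rsp`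
  -- the slot of `ImageCount` before the call …
  have hlen32 : F.imgs.length < 2 ^ 32 := by
    rw [← hcnt]
    exact rd_lt v.mem (F.gif + 32) 4
  have e32 : (BitVec.ofNat 32 F.imgs.length).toNat = F.imgs.length := by
    rw [BitVec.toNat_ofNat]
    exact Nat.mod_eq_of_lt hlen32
  have hp1 : s_10588c.mem.readLE (e.reg .rsp - 76) 4 = F.imgs.length := by
    rw [w_mem_10588c, e32]
    u_read
  v_after_call w_rsp_10588c w_mem_10588c
  rw [w_mem_10588c] at hp1
  -- … and behind it
  have hs1 : s_10588cr.mem.readLE (e.reg .rsp - 76) 4 = F.imgs.length := by u_frame hp1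
  -- 5. THE WALK, to the head of the image loop
  u_walk hcode [hμ.vendor] until [Gif.L.digest_file.at_1059af]
    span [ProgX.Base.L.textLo, ProgX.Base.L.textHi] side (v_side)
  -- 6. 0x1058a4 → 0x1059af (gif_driver.c:158): AT THE HEAD, `Head F.imgs.length`: `At` by `digest_file.At.carry`
  have hun : ShadowUntouched v.mem s_1058a4.mem := by v_untouched
  have hsame : Mem.SameExcept [⟨(e.reg .rsp).toNat - 224, (e.reg .rsp).toNat - 64⟩] v.mem s_1058a4.mem := by
    rw [w_mem]
    u_same
  have habi : (conv u₀).inv s_1058a4 := by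
    refine ProgX.Base.abiInv_of ?_ ?_
    · rw [w_flags]
      exact w_df
    · rw [w_mxcsr]
      exact w_mx
  have hat' := hat.carry (cut' := Gif.L.digest_file.at_1059af) w_rip w_rsp (w_kept.get .r12 rfl)
    (ProgX.Base.conv_code_in w_eq) habi hun hsame
  have hr13 : (s_1058a4.reg .r13).toNat = 0 := by
    rw [w_r13]
    decide
  refine ReachVia.done ⟨F.imgs.length, hat', ?_, ?_, ?_⟩
  · -- the slot of `ImageCount`: the two stores behind the call miss it
    rw [w_mem]
    u_frame hs1
  · -- k = 0
    rw [hr13]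
    exact Nat.zero_le _
  · -- the measure
    rw [hr13]
    rfl

end Gif.Spec.digest_file_3
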